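-- pv_equiv track=rewrite | github.com/flytohub/flyto-indexer | src/analyzer/type_filter.py | _normalize_type
-- ===== SOURCE A (Python) =====
-- def _normalize_type(raw: str) -> str:
--     """Trim generics, optional markers, unions — keep the root type name."""
--     if not raw:
--         return ""
--     t = raw.strip()
--     # Drop optional/union: "int | None" -> "int"
--     if "|" in t:
--         t = t.split("|", 1)[0].strip()
--     # Drop generics: "List[str]" -> "List"
--     for opener in ("[", "<"):
--         if opener in t:
--             t = t.split(opener, 1)[0].strip()
--     # Drop ellipsis / trailing punctuation
--     t = t.rstrip(".,;")
--     return t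
-- ===== SOURCE B (Python) =====
-- def _normalize_type(raw: str) -> str:
--     """Single left-to-right scan: collect characters until the first
--     delimiter ('|', '[' or '<'), then clean up once."""
--     head = []
--     for c in raw.strip():
--         if c in "|[<":
--             break
--         head.append(c)
--     return "".join(head).strip().rstrip(".,;")
-- ===== Notes on version B (the rewrite author's own statement) =====
-- stated objective: simpler
-- what changed: A's chain of three conditional split-and-strip passes (one per delimiter) is replaced by a single left-to-right scan that collects characters up to the first union/generic delimiter, followed by one strip and one trailing-punctuation rstrip.
import Mathlib
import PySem

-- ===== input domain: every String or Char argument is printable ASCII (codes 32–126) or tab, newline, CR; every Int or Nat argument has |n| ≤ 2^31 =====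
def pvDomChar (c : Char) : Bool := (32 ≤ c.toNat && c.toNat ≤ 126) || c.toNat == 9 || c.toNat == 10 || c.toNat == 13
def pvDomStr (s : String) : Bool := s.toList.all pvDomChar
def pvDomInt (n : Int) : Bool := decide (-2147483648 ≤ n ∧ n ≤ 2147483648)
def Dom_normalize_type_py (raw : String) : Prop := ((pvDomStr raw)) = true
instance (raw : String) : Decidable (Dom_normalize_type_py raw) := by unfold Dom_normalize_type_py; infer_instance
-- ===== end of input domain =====

-- B replaces A's three conditional split-and-strip passes by one scan to the first delimiter plus a single cleanup (objective: simpler).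

-- exact port of str.rstrip(".,;"): drop trailing '.', ',' and ';' (both Pythons end with this same builtin call)
def pvRstripPunct (cs : List Char) : List Char :=
  (cs.reverse.dropWhile (fun c => c == '.' || c == ',' || c == ';')).reverse

-- exact port of s.split(d, 1)[0]: the text before the first occurrence of d (the whole of s when d is absent, as in Python)
def pvSplit1Head (cs : List Char) (d : Char) : List Char := cs.takeWhile (fun c => c != d)

-- ===== PORT A =====
def normalize_type_py (raw : String) : String :=
  if raw = "" then ""
  else
    let t0 := PySem.Chars.strip raw.toList
    let t1 := if PySem.Chars.isIn ['|'] t0 then PySem.Chars.strip (pvSplit1Head t0 '|') else t0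
    let t2 := if PySem.Chars.isIn ['['] t1 then PySem.Chars.strip (pvSplit1Head t1 '[') else t1
    let t3 := if PySem.Chars.isIn ['<'] t2 then PySem.Chars.strip (pvSplit1Head t2 '<') else t2
    String.ofList (pvRstripPunct t3)

-- ===== PORT B =====
-- the for-loop of Source B: collect characters until the first delimiter, then stop
def pvScanHead : List Char → List Char
  | [] => []
  | c :: cs => if c == '|' || c == '[' || c == '<' then [] else c :: pvScanHead cs

def normalize_type_py_alt (raw : String) : String :=
  String.ofList (pvRstripPunct (PySem.Chars.strip (pvScanHead (PySem.Chars.strip raw.toList))))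

-- ===== PRECONDITION & SPEC =====
def Spec_normalize_type_py (raw : String) (out : String) : Prop := out = normalize_type_py_alt raw
instance (raw : String) (out : String) : Decidable (Spec_normalize_type_py raw out) := by unfold Spec_normalize_type_py; infer_instance

-- ===== CLAIM (what is proved, stated in full; the proofs are below) =====
def Claim_equal_normalize_type_py : Prop := ∀ (raw : String), Dom_normalize_type_py raw → Spec_normalize_type_py raw (normalize_type_py raw)

-- ===== LEMMAS AND PROOFS =====

-- B's scan loop is takeWhile of the complement of the delimiter class
lemma pvScanHead_eq_takeWhile (cs : List Char) :
    pvScanHead cs = cs.takeWhile (fun c => !(c == '|' || c == '[' || c == '<')) := by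
  induction cs with
  | nil => rfl
  | cons c cs ih =>
    by_cases h : (c == '|' || c == '[' || c == '<') = true
    · simp only [Bool.or_eq_true, beq_iff_eq] at h
      simp [pvScanHead, List.takeWhile_cons, h]
      tauto
    · simp only [Bool.or_eq_true, beq_iff_eq, not_or] at h
      simp [pvScanHead, h, ih]

-- membership test "d in t" (single-character needle)
lemma pvIsIn_singleton (d : Char) (t : List Char) :
    PySem.Chars.isIn [d] t = true ↔ d ∈ t := by
  rw [PySem.Chars.isIn_iff_infix]
  constructor
  · intro h; exact h.sublist.subset (List.mem_singleton_self d)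
  · intro h
    obtain ⟨s, t', rfl⟩ := List.append_of_mem h
    exact ⟨s, t', by simp⟩

lemma pvDropWhile_idem (p : Char → Bool) (l : List Char) :
    (l.dropWhile p).dropWhile p = l.dropWhile p := by
  induction l with
  | nil => rfl
  | cons c cs ih =>
    by_cases h : p c = true <;> simp [h, ih]

lemma pvRstrip_idem (l : List Char) :
    PySem.Chars.rstrip (PySem.Chars.rstrip l) = PySem.Chars.rstrip l := by
  simp [PySem.Chars.rstrip, pvDropWhile_idem]

-- rstrip keeps a prefix of its argument
lemma pvRstrip_prefix (l : List Char) : PySem.Chars.rstrip l <+: l := by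
  have h2 : (PySem.Chars.rstrip l).reverse <:+ l.reverse := by
    simpa [PySem.Chars.rstrip] using
      List.dropWhile_suffix (l := l.reverse) PySem.Chars.isspace
  exact List.reverse_suffix.mp h2

-- lstrip is a no-op on a list with no leading whitespace (e.g. anything already lstripped)
lemma pvLstrip_of_lstripped (y : List Char) (hy : PySem.Chars.lstrip y = y) :
    PySem.Chars.lstrip (PySem.Chars.rstrip y) = PySem.Chars.rstrip y := by
  rcases hr : PySem.Chars.rstrip y with _ | ⟨c, z⟩
  · rfl
  · have hpre : c :: z <+: y := hr ▸ pvRstrip_prefix y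
    obtain ⟨rest, hrest⟩ := hpre
    have hc : PySem.Chars.isspace c = false := by
      rcases hb : PySem.Chars.isspace c
      · rfl
      · exfalso
        have hy' : List.dropWhile PySem.Chars.isspace (z ++ rest) = c :: (z ++ rest) := by
          have h := hy
          rw [← hrest] at h
          simpa [PySem.Chars.lstrip, List.dropWhile_cons, hb] using h
        have hlen := List.length_dropWhile_le (p := PySem.Chars.isspace) (l := z ++ rest)
        rw [hy'] at hlen
        simp at hlen
    simp [PySem.Chars.lstrip, hc]

lemma pvStrip_idem (l : List Char) :
    PySem.Chars.strip (PySem.Chars.strip l) = PySem.Chars.strip l := by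
  show PySem.Chars.rstrip (PySem.Chars.lstrip (PySem.Chars.rstrip (PySem.Chars.lstrip l)))
      = PySem.Chars.rstrip (PySem.Chars.lstrip l)
  rw [pvLstrip_of_lstripped (PySem.Chars.lstrip l) (pvDropWhile_idem _ _), pvRstrip_idem]

-- takeWhile commutes with lstrip when p accepts every whitespace character
lemma pvTakeWhile_lstrip (p : Char → Bool) (hp : ∀ c, PySem.Chars.isspace c = true → p c = true)
    (l : List Char) : (PySem.Chars.lstrip l).takeWhile p = PySem.Chars.lstrip (l.takeWhile p) := by
  induction l with
  | nil => rfl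
  | cons c cs ih =>
    by_cases h : PySem.Chars.isspace c = true
    · simp [PySem.Chars.lstrip, h, hp c h] at ih ⊢
      exact ih
    · by_cases hpc : p c = true <;>
        simp [PySem.Chars.lstrip, h, hpc]

-- appending all-whitespace characters does not change rstrip
lemma pvRstrip_append_ws (x w : List Char) (hw : ∀ c ∈ w, PySem.Chars.isspace c = true) :
    PySem.Chars.rstrip (x ++ w) = PySem.Chars.rstrip x := by
  simp [PySem.Chars.rstrip, List.dropWhile_append,
        List.dropWhile_eq_nil_iff.mpr (by intro c hc; exact hw c (List.mem_reverse.mp hc))]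

-- ... nor strip
lemma pvStrip_append_ws (x w : List Char) (hw : ∀ c ∈ w, PySem.Chars.isspace c = true) :
    PySem.Chars.strip (x ++ w) = PySem.Chars.strip x := by
  show PySem.Chars.rstrip (PySem.Chars.lstrip (x ++ w)) = PySem.Chars.rstrip (PySem.Chars.lstrip x)
  unfold PySem.Chars.lstrip
  rw [List.dropWhile_append]
  by_cases hx : (List.dropWhile PySem.Chars.isspace x).isEmpty = true
  · rw [if_pos hx, List.dropWhile_eq_nil_iff.mpr hw,
        List.isEmpty_iff.mp hx]
  · rw [if_neg hx]
    exact pvRstrip_append_ws _ w hw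

-- the key interchange: stripping before a whitespace-transparent takeWhile is absorbed by the outer strip
-- stripping before the takeWhile is absorbed by the final strip (rstrip half)
lemma pvStrip_takeWhile_rstrip (p : Char → Bool) (hp : ∀ c, PySem.Chars.isspace c = true → p c = true)
    (v : List Char) :
    PySem.Chars.strip ((PySem.Chars.rstrip v).takeWhile p) = PySem.Chars.strip (v.takeWhile p) := by
  have hsplit : v = PySem.Chars.rstrip v ++ (v.reverse.takeWhile PySem.Chars.isspace).reverse := by
    rw [PySem.Chars.rstrip, ← List.reverse_append, List.takeWhile_append_dropWhile,
        List.reverse_reverse]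
  have hw : ∀ c ∈ (v.reverse.takeWhile PySem.Chars.isspace).reverse, PySem.Chars.isspace c = true :=
    fun c hc => List.mem_takeWhile_imp (List.mem_reverse.mp hc)
  conv_rhs => rw [hsplit]
  rw [List.takeWhile_append]
  by_cases hlen : ((PySem.Chars.rstrip v).takeWhile p).length = (PySem.Chars.rstrip v).length
  · rw [if_pos hlen, (List.takeWhile_prefix p).eq_of_length hlen,
        List.takeWhile_eq_self_iff.mpr (fun c hc => hp c (hw c hc)),
        pvStrip_append_ws _ _ hw]
  · rw [if_neg hlen]

lemma pvStrip_takeWhile_strip (p : Char → Bool) (hp : ∀ c, PySem.Chars.isspace c = true → p c = true)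
    (u : List Char) :
    PySem.Chars.strip ((PySem.Chars.strip u).takeWhile p) = PySem.Chars.strip (u.takeWhile p) := by
  show PySem.Chars.strip ((PySem.Chars.rstrip (PySem.Chars.lstrip u)).takeWhile p) = _
  rw [pvStrip_takeWhile_rstrip p hp, pvTakeWhile_lstrip p hp]
  show PySem.Chars.rstrip (PySem.Chars.lstrip (PySem.Chars.lstrip (u.takeWhile p))) = _
  rw [show PySem.Chars.lstrip (PySem.Chars.lstrip (u.takeWhile p))
        = PySem.Chars.lstrip (u.takeWhile p) from pvDropWhile_idem _ _]
  rfl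

-- one stage of A: the conditional split-and-strip always equals strip ∘ takeWhile on an already-stripped input
lemma pvStageA (d : Char) (t : List Char) (ht : PySem.Chars.strip t = t) :
    (if PySem.Chars.isIn [d] t then PySem.Chars.strip (pvSplit1Head t d) else t)
      = PySem.Chars.strip (t.takeWhile (fun c => c != d)) := by
  by_cases h : PySem.Chars.isIn [d] t = true
  · simp [h, pvSplit1Head]
  · have hd : d ∉ t := fun hm => h ((pvIsIn_singleton d t).mpr hm)
    have : t.takeWhile (fun c => c != d) = t :=
      List.takeWhile_eq_self_iff.mpr (fun x hx => by
        simp only [bne_iff_ne]; rintro rfl; exact hd hx)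
    simp [h, this, ht]

-- ===== VERDICT (by name: the statement is the Claim_ definition above) =====
theorem normalize_type_py_spec : Claim_equal_normalize_type_py := by
  intro raw _
  unfold Spec_normalize_type_py normalize_type_py normalize_type_py_alt
  by_cases h : raw = ""
  · subst h; rfl
  · rw [if_neg h]
    dsimp only
    have hp1 : ∀ c, PySem.Chars.isspace c = true → (c != '|') = true :=
      fun c hc => bne_iff_ne.mpr (fun he => by rw [he] at hc; exact absurd hc (by decide))
    have hp2 : ∀ c, PySem.Chars.isspace c = true → (c != '[') = true :=
      fun c hc => bne_iff_ne.mpr (fun he => by rw [he] at hc; exact absurd hc (by decide))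
    have hp3 : ∀ c, PySem.Chars.isspace c = true → (c != '<') = true :=
      fun c hc => bne_iff_ne.mpr (fun he => by rw [he] at hc; exact absurd hc (by decide))
    rw [pvStageA '|' _ (pvStrip_idem _), pvStageA '[' _ (pvStrip_idem _),
        pvStageA '<' _ (pvStrip_idem _),
        pvStrip_takeWhile_strip _ hp2, List.takeWhile_takeWhile,
        pvStrip_takeWhile_strip _ hp3, List.takeWhile_takeWhile,
        pvScanHead_eq_takeWhile]
    congr 2
    congr 1
    congr 1
    funext c
    by_cases h1 : c = '|' <;> by_cases h2 : c = '[' <;> by_cases h3 : c = '<' <;>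
      simp [h1, h2, h3]
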